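-- pv_equiv track=rewrite | github.com/Nithin1729S/NITK-IT-2026-Assignments | CS101 - Python Programming Lab/A12_StringComposition.py | string_composition
-- ===== SOURCE A (Python) =====
-- def string_composition(input_string):
--     no_uppercase=0
--     no_lowercase=0
--     no_numbers=0
--     no_others=0
--     if type(input_string)==str:
--         for _ in input_string:
--             if _.isupper():
--                 no_uppercase+=1
--             elif _.islower():
--                 no_lowercase+=1
--             elif _.isnumeric():
--                 no_numbers+=1
--             else:
--                 no_others+=1
--         lst=[no_uppercase,no_lowercase,no_numbers,no_others]
--         return lst
--     else:
--         raise ValueError ("Invalid input type. Expecting a String.")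
-- ===== SOURCE B (Python) =====
-- def string_composition(input_string):
--     if type(input_string) != str:
--         raise ValueError("Invalid input type. Expecting a String.")
--     upper = sum(1 for c in input_string if c.isupper())
--     lower = sum(1 for c in input_string if c.islower())
--     numbers = sum(1 for c in input_string if c.isnumeric())
--     return [upper, lower, numbers, len(input_string) - upper - lower - numbers]
-- ===== Notes on version B (the rewrite author's own statement) =====
-- stated objective: alternative
-- what changed: Replaces the single four-counter branching loop by three independent predicate counts plus computing the fourth count by subtraction from the length (exact because the predicates are mutually exclusive).
import Mathlib
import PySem

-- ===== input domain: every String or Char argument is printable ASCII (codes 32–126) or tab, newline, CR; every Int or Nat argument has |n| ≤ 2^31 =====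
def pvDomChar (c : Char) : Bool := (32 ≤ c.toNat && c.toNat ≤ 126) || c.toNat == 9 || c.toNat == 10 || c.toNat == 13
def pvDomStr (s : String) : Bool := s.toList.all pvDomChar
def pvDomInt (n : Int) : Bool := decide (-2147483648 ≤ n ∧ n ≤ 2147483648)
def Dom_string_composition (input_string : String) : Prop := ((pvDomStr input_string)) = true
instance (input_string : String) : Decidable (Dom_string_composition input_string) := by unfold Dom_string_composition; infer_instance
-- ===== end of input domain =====

-- B replaces A's single four-counter branching loop by three independent predicate
-- counts plus the fourth count computed by subtraction from the length (objective: alternative).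
-- isnumeric is ported as PySem.Chars.isdigit: exact on the printable-ASCII domain.

-- ===== PORT A =====
-- one loop over the characters keeping four counters, if/elif branch chain
def string_composition (input_string : String) : List Int :=
  let st := input_string.toList.foldl
    (fun (st : Int × Int × Int × Int) c =>
      if PySem.Chars.isupper c then (st.1 + 1, st.2.1, st.2.2.1, st.2.2.2)
      else if PySem.Chars.islower c then (st.1, st.2.1 + 1, st.2.2.1, st.2.2.2)
      else if PySem.Chars.isdigit c then (st.1, st.2.1, st.2.2.1 + 1, st.2.2.2)
      else (st.1, st.2.1, st.2.2.1, st.2.2.2 + 1))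
    (0, 0, 0, 0)
  [st.1, st.2.1, st.2.2.1, st.2.2.2]

-- ===== PORT B =====
-- three independent counts, others by subtraction
def string_composition_alt (input_string : String) : List Int :=
  let cs := input_string.toList
  let upper : Int := cs.countP PySem.Chars.isupper
  let lower : Int := cs.countP PySem.Chars.islower
  let numbers : Int := cs.countP PySem.Chars.isdigit
  [upper, lower, numbers, (cs.length : Int) - upper - lower - numbers]

-- ===== PRECONDITION & SPEC =====
def Spec_string_composition (input_string : String) (out : List Int) : Prop := out = string_composition_alt input_string
instance (input_string : String) (out : List Int) : Decidable (Spec_string_composition input_string out) := by unfold Spec_string_composition; infer_instance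

-- ===== CLAIM (what is proved, stated in full; the proofs are below) =====
def Claim_equal_string_composition : Prop := ∀ (input_string : String), Dom_string_composition input_string → Spec_string_composition input_string (string_composition input_string)

-- ===== LEMMAS AND PROOFS =====

-- predicate disjointness on chars: the three buckets never overlap
theorem sc_up_not_lo (c : Char) (h : PySem.Chars.isupper c = true) : PySem.Chars.islower c = false := by
  revert h
  simp [PySem.Chars.isupper, PySem.Chars.islower, Char.le_def, UInt32.le_iff_toNat_le]
  omega

theorem sc_up_not_dig (c : Char) (h : PySem.Chars.isupper c = true) : PySem.Chars.isdigit c = false := by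
  revert h
  simp [PySem.Chars.isupper, PySem.Chars.isdigit, Char.le_def, UInt32.le_iff_toNat_le]
  omega

theorem sc_lo_not_dig (c : Char) (h : PySem.Chars.islower c = true) : PySem.Chars.isdigit c = false := by
  revert h
  simp [PySem.Chars.islower, PySem.Chars.isdigit, Char.le_def, UInt32.le_iff_toNat_le]
  omega

-- loop invariant: A's fold adds the three predicate counts and the remainder to the accumulator
theorem sc_fold_inv (l : List Char) (u lo n o : Int) :
    l.foldl
      (fun (st : Int × Int × Int × Int) c =>
        if PySem.Chars.isupper c then (st.1 + 1, st.2.1, st.2.2.1, st.2.2.2)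
        else if PySem.Chars.islower c then (st.1, st.2.1 + 1, st.2.2.1, st.2.2.2)
        else if PySem.Chars.isdigit c then (st.1, st.2.1, st.2.2.1 + 1, st.2.2.2)
        else (st.1, st.2.1, st.2.2.1, st.2.2.2 + 1))
      (u, lo, n, o)
    = (u + l.countP PySem.Chars.isupper,
       lo + l.countP PySem.Chars.islower,
       n + l.countP PySem.Chars.isdigit,
       o + ((l.length : Int)
            - l.countP PySem.Chars.isupper
            - l.countP PySem.Chars.islower
            - l.countP PySem.Chars.isdigit)) := by
  induction l generalizing u lo n o with
  | nil => simp
  | cons c t ih =>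
    by_cases hu : PySem.Chars.isupper c
    · simp only [List.foldl, hu, if_true, ih, List.countP_cons, Prod.mk.injEq, sc_up_not_lo c hu,
        sc_up_not_dig c hu, List.length_cons, Prod.mk.injEq]
      refine ⟨by push_cast; ring, by push_cast; ring, by push_cast; ring, by push_cast; ring⟩
    · by_cases hl : PySem.Chars.islower c
      · simp only [List.foldl, hu, hl, if_true, Bool.false_eq_true, if_false, ih,
          List.countP_cons, sc_lo_not_dig c hl, List.length_cons, Prod.mk.injEq]
        refine ⟨by push_cast; ring, by push_cast; ring, by push_cast; ring, by push_cast; ring⟩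
      · by_cases hd : PySem.Chars.isdigit c
        · simp only [List.foldl, hu, hl, hd, if_true, Bool.false_eq_true, if_false, ih,
            List.countP_cons, List.length_cons, Prod.mk.injEq]
          refine ⟨by push_cast; ring, by push_cast; ring, by push_cast; ring, by push_cast; ring⟩
        · simp only [List.foldl, hu, hl, hd, Bool.false_eq_true, if_false, ih,
            List.countP_cons, List.length_cons, Prod.mk.injEq]
          refine ⟨by push_cast; ring, by push_cast; ring, by push_cast; ring, by push_cast; ring⟩

-- ===== VERDICT (by name: the statement is the Claim_ definition above) =====
theorem string_composition_spec : Claim_equal_string_composition := by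
  intro s _
  unfold Spec_string_composition string_composition string_composition_alt
  simp [sc_fold_inv]
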